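-- pv_equiv track=rewrite | github.com/vonstring/livedar | libmediapipe/analyze.py | clean_up
-- ===== SOURCE A (Python) =====
-- def clean_up(string, names_only=True):
--     """
--     Clean up a string - remove any tiny words, any punctuation, pipes etc
--     We also only allow one line of text for now (the longest one)
--     """
--     lines = []
--
--     for line in string.split("\n"):
--         words = []
--         is_crap = True
--
--         for w in line.split(" "):
--             if len(w) <= 2:
--                 continue
--
--             if not w.isalnum():
--                 continue
--
--             if len(w) > 3:
--                 is_crap = False
--
--             if names_only and w[0] != w[0].upper():
--                 continue
--
--             if names_only:
--                 bad = False
--                 for i in range(1, len(w)):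
--                     if w[i] == w[1].upper():
--                         bad = True
--                 if bad:
--                     continue
--             words.append(w)
--         if not is_crap:
--             lines.append(words)
--
--     if len(lines) == 0:
--         return ""
--
--     # Which line is longer?
--     def get_length(a):
--         return len(a)
--     lines.sort(key=get_length, reverse=True)
--
--     words = lines[0]
--     res = " ".join(words).strip()
--     if len(res) < 7:
--         return ""
--
--     return res
-- ===== SOURCE B (Python) =====
-- def clean_up(string, names_only=True):
--     """
--     Clean up a string - remove any tiny words, any punctuation, pipes etc
--     We also only allow one line of text for now (the longest one)
--
--     Single pass: keep a running 'best' (first longest) line instead of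
--     collecting all lines and sorting; per line, filter with comprehensions.
--     """
--     best = None
--
--     for line in string.split("\n"):
--         cand = [w for w in line.split(" ") if len(w) > 2 and w.isalnum()]
--         if not any(len(w) > 3 for w in cand):
--             continue
--         if names_only:
--             cand = [w for w in cand
--                     if w[0] == w[0].upper() and w[1].upper() not in w[1:]]
--         if best is None or len(cand) > len(best):
--             best = cand
--
--     if best is None:
--         return ""
--
--     res = " ".join(best).strip()
--     if len(res) < 7:
--         return ""
--     return res
-- ===== Notes on version B (the rewrite author's own statement) =====
-- stated objective: simpler
-- what changed: B replaces A's collect-all-lines-then-stable-reverse-sort with a single running first-longest 'best' line, and replaces A's stateful per-word loop (is_crap flag, index loop over range(1,len(w))) with two filter comprehensions, an any() over the candidates and a substring membership test 'w[1].upper() not in w[1:]'.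
import Mathlib
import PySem

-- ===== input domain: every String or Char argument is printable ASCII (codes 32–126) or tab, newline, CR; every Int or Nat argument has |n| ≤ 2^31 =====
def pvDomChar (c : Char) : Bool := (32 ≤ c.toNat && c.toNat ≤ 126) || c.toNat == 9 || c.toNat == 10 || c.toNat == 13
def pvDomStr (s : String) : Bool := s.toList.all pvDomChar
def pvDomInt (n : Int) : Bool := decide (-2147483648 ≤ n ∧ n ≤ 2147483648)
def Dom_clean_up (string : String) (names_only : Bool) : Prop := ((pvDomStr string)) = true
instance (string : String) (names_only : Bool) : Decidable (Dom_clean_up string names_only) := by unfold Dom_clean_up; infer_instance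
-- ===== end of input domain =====

-- B keeps a single running first-longest line and uses filter comprehensions instead of
-- A's lines-list + stable reverse sort and stateful word loop (objective: simpler).

-- ===== PORT A =====
-- inner word loop of A: state = (words, is_crap)
def pvStepA (names_only : Bool) (st : List (List Char) × Bool) (w : List Char) : List (List Char) × Bool :=
  if w.length ≤ 2 then st
  else if !(PySem.Chars.strIsalnum w) then st
  else
    let st1 : List (List Char) × Bool := if 3 < w.length then (st.1, false) else st
    match PySem.List.pyGet? w 0, PySem.List.pyGet? w 1 with
    | some c0, some c1 =>
        if names_only && !(c0 == PySem.Chars.upperChar c0) then st1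
        else
          -- bad = any i in range(1, len(w)) with w[i] == w[1].upper()
          let bad := (PySem.List.pyRange 1 (w.length) 1).foldl
            (fun bad i => if PySem.List.pyGet? w i == some (PySem.Chars.upperChar c1) then true else bad) false
          if names_only && bad then st1
          else (st1.1 ++ [w], st1.2)
    | _, _ => st1   -- unreachable: w.length ≥ 3 here

def clean_up (string : String) (names_only : Bool) : String :=
  let lines : List (List (List Char)) :=
    (PySem.Chars.splitOn string.toList ['\n']).foldl
      (fun lines line =>
        let st := (PySem.Chars.splitOn line [' ']).foldl (pvStepA names_only) ([], true)
        if st.2 then lines else lines ++ [st.1]) []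
  if lines.length = 0 then ""
  else
    match (PySem.List.sorted lines (fun a => a.length) true).head? with
    | none => ""   -- unreachable: lines ≠ []
    | some words =>
        let res := PySem.Chars.strip (PySem.Chars.join [' '] words)
        if res.length < 7 then "" else String.ofList res

-- ===== PORT B =====
def pvNameOk (w : List Char) : Bool :=
  match w with
  | c0 :: c1 :: _ =>
      (c0 == PySem.Chars.upperChar c0)
        && !(PySem.Chars.isIn [PySem.Chars.upperChar c1] (PySem.List.slice w (some 1) none))
  | _ => false   -- unreachable in B: candidates have length > 2

def pvBestStep (names_only : Bool) (best : Option (List (List Char))) (line : List Char) :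
    Option (List (List Char)) :=
  let cand := (PySem.Chars.splitOn line [' ']).filter
    (fun w => decide (2 < w.length) && PySem.Chars.strIsalnum w)
  if !(cand.any (fun w => decide (3 < w.length))) then best
  else
    let cand := if names_only then cand.filter pvNameOk else cand
    match best with
    | none => some cand
    | some b => if b.length < cand.length then some cand else some b

def clean_up_alt (string : String) (names_only : Bool) : String :=
  match (PySem.Chars.splitOn string.toList ['\n']).foldl (pvBestStep names_only) none with
  | none => ""
  | some best =>
      let res := PySem.Chars.strip (PySem.Chars.join [' '] best)
      if res.length < 7 then "" else String.ofList res

-- ===== PRECONDITION & SPEC =====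
def Spec_clean_up (string : String) (names_only : Bool) (out : String) : Prop := out = clean_up_alt string names_only
instance (string : String) (names_only : Bool) (out : String) : Decidable (Spec_clean_up string names_only out) := by unfold Spec_clean_up; infer_instance

-- ===== CLAIM (what is proved, stated in full; the proofs are below) =====
def Claim_equal_clean_up : Prop := ∀ (string : String) (names_only : Bool), Dom_clean_up string names_only → Spec_clean_up string names_only (clean_up string names_only)

-- ===== LEMMAS AND PROOFS =====

-- proof-side word predicates shared by the two characterisations
def pvBig (w : List Char) : Bool :=
  decide (2 < w.length) && PySem.Chars.strIsalnum w && decide (3 < w.length)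

def pvKeep (names_only : Bool) (w : List Char) : Bool :=
  decide (2 < w.length) && PySem.Chars.strIsalnum w && (!names_only || pvNameOk w)

-- A's bad-index loop equals B's substring-membership test
lemma bad_loop_eq_isIn (w : List Char) (u : Char) :
    ((PySem.List.pyRange 1 (w.length) 1).foldl
      (fun bad i => if PySem.List.pyGet? w i == some u then true else bad) false)
      = PySem.Chars.isIn [u] (PySem.List.slice w (some 1) none) := by
  rw [PySem.List.foldl_if_true_eq (p := fun i => PySem.List.pyGet? w i == some u)]
  rw [PySem.List.slice_from w (by norm_num : (0:Int) ≤ 1)]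
  simp only [Bool.false_or]
  rw [Bool.eq_iff_iff]
  simp only [List.any_eq_true, PySem.List.mem_pyRange_one, PySem.Chars.isIn_iff_infix,
    List.singleton_infix_iff, beq_iff_eq]
  constructor
  · rintro ⟨i, ⟨h1, h2⟩, hg⟩
    obtain ⟨n, rfl⟩ : ∃ n : Nat, i = (n : Int) := ⟨i.toNat, by omega⟩
    rw [PySem.List.pyGet?_natCast] at hg
    have hn1 : 1 ≤ n := by exact_mod_cast h1
    have hn2 : n < w.length := by exact_mod_cast h2
    rw [List.getElem?_eq_getElem hn2] at hg
    have hgu : w[n] = u := by simpa using hg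
    have : w[n] ∈ w.drop 1 := by
      rw [List.mem_iff_getElem]
      exact ⟨n - 1, by simp; omega, by rw [List.getElem_drop]; congr 1; omega⟩
    rwa [hgu] at this
  · intro hm
    rw [List.mem_iff_getElem] at hm
    obtain ⟨k, hk, hg⟩ := hm
    have hk' : 1 + k < w.length := by simp at hk; omega
    refine ⟨((1 + k : Nat) : Int), ⟨by exact_mod_cast Nat.le_add_right 1 k,
      by exact_mod_cast hk'⟩, ?_⟩
    rw [PySem.List.pyGet?_natCast]
    rw [List.getElem_drop] at hg
    rw [List.getElem?_eq_getElem hk']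
    simp only [Option.some.injEq]
    simpa using hg

lemma stepA_eq_core (names_only : Bool) (st : List (List Char) × Bool) (c0 c1 : Char) (rest : List Char)
    (hlen : ¬ (c0 :: c1 :: rest).length ≤ 2)
    (haln : PySem.Chars.strIsalnum (c0 :: c1 :: rest) = true) :
    pvStepA names_only st (c0 :: c1 :: rest)
      = (if pvKeep names_only (c0 :: c1 :: rest) then st.1 ++ [c0 :: c1 :: rest] else st.1,
         if pvBig (c0 :: c1 :: rest) then false else st.2) := by
  have H2 : 2 < (c0 :: c1 :: rest).length := Nat.not_le.mp hlen
  have hB : pvBig (c0 :: c1 :: rest) = decide (3 < (c0 :: c1 :: rest).length) := by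
    simp only [pvBig, haln, H2, decide_true, Bool.true_and, Bool.and_true]
  rw [pvStepA]
  simp only [if_neg hlen, haln, Bool.not_true, Bool.false_eq_true, if_false]
  have hget0 : PySem.List.pyGet? (c0 :: c1 :: rest) (0:Int) = some c0 := by
    simpa using PySem.List.pyGet?_natCast (c0 :: c1 :: rest) 0
  have hget1 : PySem.List.pyGet? (c0 :: c1 :: rest) (1:Int) = some c1 := by
    simpa using PySem.List.pyGet?_natCast (c0 :: c1 :: rest) 1
  rw [hget0, hget1]
  dsimp only
  rw [bad_loop_eq_isIn]
  have finish_skip : (if 3 < (c0 :: c1 :: rest).length then (st.1, false) else st)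
      = (st.1, if pvBig (c0 :: c1 :: rest) then false else st.2) := by
    rw [hB]
    by_cases h3 : 3 < (c0 :: c1 :: rest).length
    · simp only [h3, decide_true, if_true]
    · simp only [h3, decide_false, Bool.false_eq_true, if_false]
  have finish_keep : ((if 3 < (c0 :: c1 :: rest).length then (st.1, false) else st).1 ++ [c0 :: c1 :: rest],
        (if 3 < (c0 :: c1 :: rest).length then (st.1, false) else st).2)
      = (st.1 ++ [c0 :: c1 :: rest], if pvBig (c0 :: c1 :: rest) then false else st.2) := by
    rw [hB]
    by_cases h3 : 3 < (c0 :: c1 :: rest).length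
    · simp only [h3, decide_true, if_true]
    · simp only [h3, decide_false, Bool.false_eq_true, if_false]
  cases names_only
  case false =>
    simp only [Bool.false_and, Bool.false_eq_true, if_false]
    rw [finish_keep]
    have hK : pvKeep false (c0 :: c1 :: rest) = true := by
      simp only [pvKeep, haln, H2, decide_true, Bool.true_and, Bool.not_false, Bool.true_or, Bool.and_true]
    rw [hK, if_pos rfl]
  case true =>
    have hKn : pvKeep true (c0 :: c1 :: rest) = pvNameOk (c0 :: c1 :: rest) := by
      simp only [pvKeep, haln, H2, decide_true, Bool.true_and, Bool.not_true, Bool.false_or]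
    by_cases hc0 : (c0 == PySem.Chars.upperChar c0) = true
    case neg =>
      rw [if_pos (by simp at hc0; simp [hc0])]
      rw [finish_skip]
      have hK : pvKeep true (c0 :: c1 :: rest) = false := by
        rw [hKn, pvNameOk]; simp at hc0; simp [hc0]
      rw [hK]
      simp only [Bool.false_eq_true, if_false]
    case pos =>
      rw [if_neg (by simp [hc0])]
      by_cases hbad : PySem.Chars.isIn [PySem.Chars.upperChar c1] (PySem.List.slice (c0 :: c1 :: rest) (some 1) none) = true
      · rw [if_pos (by simp [hbad])]
        rw [finish_skip]
        have hK : pvKeep true (c0 :: c1 :: rest) = false := by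
          rw [hKn, pvNameOk]; simp [hbad]
        rw [hK]
        simp only [Bool.false_eq_true, if_false]
      · rw [if_neg (by simp at hbad; simp [hbad])]
        rw [finish_keep]
        have hK : pvKeep true (c0 :: c1 :: rest) = true := by
          rw [hKn, pvNameOk]; simp at hbad; simp [hc0, hbad]
        rw [hK, if_pos rfl]

lemma stepA_eq (names_only : Bool) (st : List (List Char) × Bool) (w : List Char) :
    pvStepA names_only st w
      = (if pvKeep names_only w then st.1 ++ [w] else st.1,
         if pvBig w then false else st.2) := by
  match w with
  | [] => simp [pvStepA, pvKeep, pvBig]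
  | [c0] => simp [pvStepA, pvKeep, pvBig]
  | c0 :: c1 :: rest =>
    by_cases hlen : (c0 :: c1 :: rest).length ≤ 2
    · obtain rfl : rest = [] := by
        cases rest with
        | nil => rfl
        | cons a t => exact absurd hlen (by simp)
      simp [pvStepA, pvKeep, pvBig]
    · by_cases haln : PySem.Chars.strIsalnum (c0 :: c1 :: rest) = true
      · exact stepA_eq_core names_only st c0 c1 rest hlen haln
      · simp only [Bool.not_eq_true] at haln
        rw [pvStepA]
        simp [haln, pvKeep, pvBig]

-- A's inner loop over one line, in closed form
lemma lineA_eq (names_only : Bool) (ws : List (List Char)) :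
    ws.foldl (pvStepA names_only) ([], true)
      = (ws.filter (pvKeep names_only), !(ws.any pvBig)) := by
  have h1 : ws.foldl (pvStepA names_only) ([], true)
      = ws.foldl (fun st w =>
          (if pvKeep names_only w then st.1 ++ [w] else st.1,
           if pvBig w then false else st.2)) ([], true) :=
    PySem.List.foldl_congr_mem ws _ _ ([], true) (fun st w _ => stepA_eq names_only st w)
  rw [h1, PySem.List.foldl_prod_mk
        (f := fun acc w => if pvKeep names_only w then acc ++ [w] else acc)
        (g := fun b w => if pvBig w then false else b)]
  rw [PySem.List.foldl_append_if_eq_filter, PySem.List.foldl_if_false_eq]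
  simp

-- B's candidate test and candidate list, in the same closed form
lemma anyB_eq (ws : List (List Char)) :
    (ws.filter (fun w => decide (2 < w.length) && PySem.Chars.strIsalnum w)).any
        (fun w => decide (3 < w.length))
      = ws.any pvBig := by
  rw [List.any_filter]
  apply PySem.List.any_congr_mem
  intro w _
  rfl

lemma candB_eq (names_only : Bool) (ws : List (List Char)) :
    (if names_only
      then (ws.filter (fun w => decide (2 < w.length) && PySem.Chars.strIsalnum w)).filter pvNameOk
      else ws.filter (fun w => decide (2 < w.length) && PySem.Chars.strIsalnum w))
      = ws.filter (pvKeep names_only) := by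
  cases names_only
  · apply List.filter_congr
    intro w _
    simp [pvKeep]
  · rw [if_pos rfl, List.filter_filter]
    apply List.filter_congr
    intro w _
    rw [pvKeep]
    cases pvNameOk w <;> cases decide (2 < w.length) <;> cases PySem.Chars.strIsalnum w <;> simp

-- head of a stable reverse sort = Python's running first-longest
lemma head?_insertBy {α κ : Type} [LinearOrder κ] (key : α → κ) (x : α) (acc : List α) :
    (PySem.List.insertBy (fun a b => decide (key b < key a)) x acc).head?
      = (match acc.head? with
         | none => some x
         | some m => if key m < key x then some x else some m) := by
  cases acc with
  | nil => simp [PySem.List.insertBy]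
  | cons y ys =>
    by_cases h : key y < key x
    · simp [PySem.List.insertBy, h]
    · simp [PySem.List.insertBy, h]

lemma head?_sorted_rev_aux {α κ : Type} [LinearOrder κ] (key : α → κ) (ls : List α) :
    ∀ acc : List α,
      (ls.foldl (fun acc x => PySem.List.insertBy (fun a b => decide (key b < key a)) x acc) acc).head?
        = ls.foldl (fun acc x =>
            match acc with
            | none => some x
            | some m => if key m < key x then some x else some m) acc.head? := by
  induction ls with
  | nil => intro acc; simp
  | cons x xs ih =>
    intro acc
    simp only [List.foldl_cons]
    rw [ih, head?_insertBy]

lemma head?_sorted_rev {α κ : Type} [LinearOrder κ] (ls : List α) (key : α → κ) :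
    (PySem.List.sorted ls key true).head?
      = ls.foldl (fun acc x =>
          match acc with
          | none => some x
          | some m => if key m < key x then some x else some m) none := by
  rw [PySem.List.sorted_rev_eq_foldl_insertBy]
  simpa using head?_sorted_rev_aux key ls []

lemma head?_sorted_rev_len (ls : List (List (List Char))) :
    (PySem.List.sorted ls (fun a => a.length) true).head?
      = ls.foldl (fun acc x =>
          match acc with
          | none => some x
          | some m => if m.length < x.length then some x else some m) none := by
  rw [head?_sorted_rev]
  congr 1
  funext acc x
  cases acc <;> rfl

-- ===== VERDICT (by name: the statement is the Claim_ definition above) =====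
theorem clean_up_spec : Claim_equal_clean_up := by
  intro string names_only _
  unfold Spec_clean_up clean_up clean_up_alt
  set L := PySem.Chars.splitOn string.toList ['\n'] with hL
  -- characterise A's lines list
  have hlines : L.foldl
      (fun lines line =>
        let st := (PySem.Chars.splitOn line [' ']).foldl (pvStepA names_only) ([], true)
        if st.2 then lines else lines ++ [st.1]) []
      = (L.filter (fun line => (PySem.Chars.splitOn line [' ']).any pvBig)).map
          (fun line => (PySem.Chars.splitOn line [' ']).filter (pvKeep names_only)) := by
    have h1 : ∀ (lines : List (List (List Char))) (line : List Char), line ∈ L →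
        (let st := (PySem.Chars.splitOn line [' ']).foldl (pvStepA names_only) ([], true)
         if st.2 then lines else lines ++ [st.1])
        = (if (fun line => (PySem.Chars.splitOn line [' ']).any pvBig) line
            then lines ++ [(PySem.Chars.splitOn line [' ']).filter (pvKeep names_only)]
            else lines) := by
      intro lines line _
      rw [lineA_eq]
      cases h : (PySem.Chars.splitOn line [' ']).any pvBig <;> simp [h]
    rw [PySem.List.foldl_congr_mem _ _ _ _ h1, PySem.List.foldl_append_if]
    simp
  -- characterise B's running best
  have hbest : L.foldl (pvBestStep names_only) none
      = ((L.filter (fun line => (PySem.Chars.splitOn line [' ']).any pvBig)).map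
          (fun line => (PySem.Chars.splitOn line [' ']).filter (pvKeep names_only))).foldl
          (fun acc x =>
            match acc with
            | none => some x
            | some m => if m.length < x.length then some x else some m) none := by
    have h1 : ∀ (best : Option (List (List Char))) (line : List Char), line ∈ L →
        pvBestStep names_only best line
        = (if (fun line => (PySem.Chars.splitOn line [' ']).any pvBig) line
            then (match best with
                  | none => some ((PySem.Chars.splitOn line [' ']).filter (pvKeep names_only))
                  | some m => if m.length < ((PySem.Chars.splitOn line [' ']).filter (pvKeep names_only)).length
                              then some ((PySem.Chars.splitOn line [' ']).filter (pvKeep names_only)) else some m)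
            else best) := by
      intro best line _
      rw [pvBestStep]
      simp only [anyB_eq]
      by_cases h : (PySem.Chars.splitOn line [' ']).any pvBig = true
      · simp only [h, Bool.not_true, Bool.false_eq_true, if_false, if_true]
        rw [show (if names_only = true
              then ((PySem.Chars.splitOn line [' ']).filter (fun w => decide (2 < w.length) && PySem.Chars.strIsalnum w)).filter pvNameOk
              else (PySem.Chars.splitOn line [' ']).filter (fun w => decide (2 < w.length) && PySem.Chars.strIsalnum w))
            = (PySem.Chars.splitOn line [' ']).filter (pvKeep names_only) from candB_eq names_only _]
      · have h' : (PySem.Chars.splitOn line [' ']).any pvBig = false := by simpa using h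
        simp only [h', Bool.false_eq_true, if_false, Bool.not_false, if_true]
    rw [PySem.List.foldl_congr_mem _ _ _ _ h1, PySem.List.foldl_if_eq_foldl_filter, List.foldl_map]
  rw [hlines, hbest]
  rw [← head?_sorted_rev_len]
  set lines := (L.filter (fun line => (PySem.Chars.splitOn line [' ']).any pvBig)).map
      (fun line => (PySem.Chars.splitOn line [' ']).filter (pvKeep names_only)) with hls
  by_cases hnil : lines.length = 0
  · rw [if_pos hnil]
    rw [List.eq_nil_of_length_eq_zero hnil]
    rfl
  · rw [if_neg hnil]
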